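-- pv_equiv track=rewrite | github.com/seho27060/aug-algo-study | 0810/1022_haeng.py | NNNNNN
-- ===== SOURCE A (Python) =====
-- def NNNNNN(x,NN):
--     c = 0
--     for i in range(x):
--         if i == 0:
--             c = NN
--         else:
--             c += 8
--     return c
-- ===== SOURCE B (Python) =====
-- def NNNNNN(x, NN):
--     # closed form of the loop: first step sets c = NN, each later step adds 8
--     if x <= 0:
--         return 0
--     return NN + 8 * (x - 1)
-- ===== Notes on version B (the rewrite author's own statement) =====
-- stated objective: faster
-- what changed: Replaced the O(x) accumulation loop by the closed form NN + 8*(x-1) for x >= 1 and 0 otherwise.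
import Mathlib
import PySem

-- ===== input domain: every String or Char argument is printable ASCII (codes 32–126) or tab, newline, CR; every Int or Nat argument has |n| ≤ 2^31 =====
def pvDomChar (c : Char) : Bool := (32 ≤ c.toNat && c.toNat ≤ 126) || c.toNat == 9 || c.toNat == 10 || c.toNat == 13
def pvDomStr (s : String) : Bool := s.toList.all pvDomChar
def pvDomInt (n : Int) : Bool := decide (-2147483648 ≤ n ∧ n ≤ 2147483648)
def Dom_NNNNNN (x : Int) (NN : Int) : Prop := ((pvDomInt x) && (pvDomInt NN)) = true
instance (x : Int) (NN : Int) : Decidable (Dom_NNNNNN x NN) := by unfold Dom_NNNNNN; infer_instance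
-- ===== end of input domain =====

-- B replaces A's O(x) accumulation loop by an O(1) closed form.
-- ===== PORT A =====
-- 'for i in range(x): if i == 0: c = NN else: c += 8' as a foldl over the same range
def NNNNNN (x : Int) (NN : Int) : Int :=
  (PySem.List.pyRange 0 x 1).foldl (fun c i => if i = 0 then NN else c + 8) 0

-- ===== PORT B =====
def NNNNNN_alt (x : Int) (NN : Int) : Int :=
  if x ≤ 0 then 0 else NN + 8 * (x - 1)

-- ===== PRECONDITION & SPEC =====
def Spec_NNNNNN (x : Int) (NN : Int) (out : Int) : Prop := out = NNNNNN_alt x NN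
instance (x : Int) (NN : Int) (out : Int) : Decidable (Spec_NNNNNN x NN out) := by unfold Spec_NNNNNN; infer_instance

-- ===== CLAIM (what is proved, stated in full; the proofs are below) =====
def Claim_equal_NNNNNN : Prop := ∀ (x : Int) (NN : Int), Dom_NNNNNN x NN → Spec_NNNNNN x NN (NNNNNN x NN)

-- ===== LEMMAS AND PROOFS =====

-- ===== VERDICT (by name: the statement is the Claim_ definition above) =====
-- loop invariant: after the full range 0..n-1 (n ≥ 1), the accumulator is NN + 8*(n-1)
lemma loop_closed (NN : Int) (n : Nat) :
    ((List.range (n+1)).map (fun k : Nat => (0 : Int) + k)).foldl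
      (fun c i => if i = 0 then NN else c + 8) 0 = NN + 8 * n := by
  induction n with
  | zero => simp
  | succ m ih =>
    rw [List.range_succ, List.map_append, List.foldl_append, ih]
    have h1 : ((0 : Int) + (m+1 : Nat)) ≠ 0 := by push_cast; omega
    simp only [List.map_cons, List.map_nil, List.foldl_cons, List.foldl_nil, if_neg h1]
    push_cast; ring

theorem NNNNNN_spec : Claim_equal_NNNNNN := by
  intro x NN _
  unfold Spec_NNNNNN NNNNNN NNNNNN_alt
  rw [PySem.List.pyRange_one]
  by_cases hx : x ≤ 0
  · have h0 : x.toNat = 0 := by omega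
    simp [hx, h0]
  · have hx1 : 1 ≤ x := by omega
    have hn : (x - 0).toNat = ((x-1).toNat) + 1 := by omega
    rw [hn, loop_closed]
    have : ((x-1).toNat : Int) = x - 1 := by omega
    rw [this]
    simp [hx]
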